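-- pv_equiv track=rewrite | github.com/alepez/hackerrank-solutions | happy-ladybugs/happy-ladybugs-1.py | happy_ladybug
-- ===== SOURCE A (Python) =====
-- def happy_ladybug(b):
--     if len(b) == 0:
--         return True
--
--     left_c = b[0]
--     b = b[1:]
--     d = {}
--     has_empty = left_c == '_'
--     already_happy = True
--     adj_count = 1
--
--     if left_c != '_':
--         d[left_c] = d.setdefault(left_c, 0) + 1
--
--     for c in b:
--         if c == '_':
--             has_empty = True
--             if adj_count < 2:
--                 already_happy = False
--         else:
--             d[c] = d.setdefault(c, 0) + 1
--
--             if c == left_c: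
--                 adj_count += 1
--             else:
--                 if adj_count < 2:
--                     already_happy = False
--                 adj_count = 1
--             left_c = c
--
--     if adj_count < 2:
--         already_happy = False
--
--     all_at_least_two = all([x >= 2 for x in d.values()])
--
--     return already_happy or (has_empty and all_at_least_two)
-- ===== SOURCE B (Python) =====
-- def happy_ladybug(b):
--     counts = {}
--     for c in b:
--         if c != '_':
--             counts[c] = counts.get(c, 0) + 1
--     if '_' in b:
--         return all(v >= 2 for v in counts.values())
--     n = len(b)
--     return all((i > 0 and b[i - 1] == b[i]) or (i + 1 < n and b[i + 1] == b[i])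
--                for i in range(n))
-- ===== Notes on version B (the rewrite author's own statement) =====
-- stated objective: simpler
-- what changed: A interleaves run-length tracking, a character-count dict and an empty-cell flag in one stateful loop; B decomposes the problem: a plain counting pass over the board, then either an all-counts-at-least-2 check when an empty cell exists, or a separate positional pass checking that every ladybug has an equal left or right neighbour (no run counters at all).
import Mathlib
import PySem

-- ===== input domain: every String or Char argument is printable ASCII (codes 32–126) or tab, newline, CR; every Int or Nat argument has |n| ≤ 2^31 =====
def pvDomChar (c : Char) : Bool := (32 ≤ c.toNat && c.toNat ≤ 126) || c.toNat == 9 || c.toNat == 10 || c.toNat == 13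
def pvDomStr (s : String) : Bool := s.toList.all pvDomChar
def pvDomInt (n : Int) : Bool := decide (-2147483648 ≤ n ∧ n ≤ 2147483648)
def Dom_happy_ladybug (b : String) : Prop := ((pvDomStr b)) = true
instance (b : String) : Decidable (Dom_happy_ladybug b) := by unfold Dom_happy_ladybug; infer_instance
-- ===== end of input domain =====

-- B replaces A's single stateful run-counting loop by a counting pass plus either an
-- all-counts≥2 check (when '_' occurs) or a separate positional neighbour check (simpler decomposition).

-- ===== PORT A =====
-- loop state: (left_c, d, has_empty, already_happy, adj_count), exactly A's variables
def pvAStep : (Char × PySem.Dict Char Int × Bool × Bool × Int) → Char → (Char × PySem.Dict Char Int × Bool × Bool × Int)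
  | (left, d, he, ah, adj), c =>
    if c = '_' then
      (left, d, true, if adj < 2 then false else ah, adj)
    else
      -- d[c] = d.setdefault(c, 0) + 1
      let d1 := d.setdefault c 0
      let d2 := d1.insert c (d1.getD c 0 + 1)
      if c = left then (c, d2, he, ah, adj + 1)
      else (c, d2, he, if adj < 2 then false else ah, 1)

def happy_ladybug (b : String) : Bool :=
  match b.toList with
  | [] => true
  | left0 :: rest =>
    let he0 := left0 == '_'
    let d0 : PySem.Dict Char Int :=
      if left0 ≠ '_' then
        let d1 := (PySem.Dict.empty : PySem.Dict Char Int).setdefault left0 0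
        d1.insert left0 (d1.getD left0 0 + 1)
      else PySem.Dict.empty
    match rest.foldl pvAStep (left0, d0, he0, true, 1) with
    | (_, d, he, ah, adj) =>
      let ah := if adj < 2 then false else ah
      let all2 := (d.values.map (fun x => decide (2 ≤ x))).all (fun y => y)
      ah || (he && all2)

-- ===== PORT B =====
def pvBCount (d : PySem.Dict Char Int) (c : Char) : PySem.Dict Char Int :=
  if c ≠ '_' then d.insert c (d.getD c 0 + 1) else d

def happy_ladybug_alt (b : String) : Bool :=
  let l := b.toList
  let counts := l.foldl pvBCount PySem.Dict.empty
  if l.contains '_' then counts.values.all (fun v => decide (2 ≤ v))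
  else
    (List.range l.length).all (fun i =>
      (decide (0 < i) && (l[i-1]? == l[i]?)) || (decide (i + 1 < l.length) && (l[i+1]? == l[i]?)))

-- ===== PRECONDITION & SPEC =====
def Spec_happy_ladybug (b : String) (out : Bool) : Prop := out = happy_ladybug_alt b
instance (b : String) (out : Bool) : Decidable (Spec_happy_ladybug b out) := by unfold Spec_happy_ladybug; infer_instance

-- ===== CLAIM (what is proved, stated in full; the proofs are below) =====
def Claim_equal_happy_ladybug : Prop := ∀ (b : String), Dom_happy_ladybug b → Spec_happy_ladybug b (happy_ladybug b)

-- ===== LEMMAS AND PROOFS =====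

-- proof-only decompositions of A's loop state
def pvTStep : Char × Bool × Int → Char → Char × Bool × Int
  | (left, ah, adj), c =>
    if c = '_' then (left, (if adj < 2 then false else ah), adj)
    else if c = left then (left, ah, adj + 1)
    else (c, (if adj < 2 then false else ah), 1)

def pvDStep (d : PySem.Dict Char Int) (c : Char) : PySem.Dict Char Int :=
  if c = '_' then d
  else
    let d1 := d.setdefault c 0
    d1.insert c (d1.getD c 0 + 1)

def pvHStep (he : Bool) (c : Char) : Bool := if c = '_' then true else he

-- the whole fold splits into three independent folds
theorem pvSplit (l : List Char) (left : Char) (ah : Bool) (adj : Int)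
    (d : PySem.Dict Char Int) (he : Bool) :
    l.foldl pvAStep (left, d, he, ah, adj) =
      ((l.foldl pvTStep (left, ah, adj)).1, l.foldl pvDStep d, l.foldl pvHStep he,
       (l.foldl pvTStep (left, ah, adj)).2.1, (l.foldl pvTStep (left, ah, adj)).2.2) := by
  induction l generalizing left ah adj d he with
  | nil => rfl
  | cons c t ih =>
    simp only [List.foldl_cons]
    have hstep : pvAStep (left, d, he, ah, adj) c =
        ((pvTStep (left, ah, adj) c).1, pvDStep d c, pvHStep he c,
         (pvTStep (left, ah, adj) c).2.1, (pvTStep (left, ah, adj) c).2.2) := by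
      simp only [pvAStep, pvTStep, pvDStep, pvHStep]
      split_ifs with h1 h2 <;> simp_all
    rw [hstep, ih]

theorem pvDStep_eq_pvBCount : pvDStep = pvBCount := by
  funext d c
  simp only [pvDStep, pvBCount]
  by_cases hc : c = '_'
  · simp [hc]
  · simp only [hc, if_neg, ne_eq, not_false_iff, if_pos]
    by_cases hm : d.contains c = true
    · rw [PySem.Dict.setdefault_of_contains d 0 hm]
    · have hm' : d.contains c = false := by simpa using hm
      rw [PySem.Dict.setdefault_of_not_contains d 0 hm', PySem.Dict.getD_insert_self,
        PySem.Dict.insert_insert_self, PySem.Dict.getD_of_not_contains d 0 hm']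

theorem pvHFold (l : List Char) (he : Bool) :
    l.foldl pvHStep he = (he || l.contains '_') := by
  induction l generalizing he with
  | nil => simp
  | cons c t ih =>
    simp only [List.foldl_cons, ih, List.contains_cons, pvHStep]
    by_cases hc : c = '_'
    · simp [hc]
    · have : ('_' == c) = false := by simp; exact fun h => hc h.symm
      simp [hc, this]

-- structural neighbour check: nb prev a t says every char of a::t has an equal neighbour,
-- where prev records whether a is already supported on its left
def pvNb (prev : Bool) (a : Char) : List Char → Bool
  | [] => prev
  | c :: t => (prev || (c == a)) && pvNb (c == a) c t

theorem pvTFold_no_us (l : List Char) (hl : ∀ c ∈ l, c ≠ '_') :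
    ∀ (left : Char) (ah : Bool) (adj : Int), 1 ≤ adj →
    (if (l.foldl pvTStep (left, ah, adj)).2.2 < 2 then false
     else (l.foldl pvTStep (left, ah, adj)).2.1) = (ah && pvNb (decide (2 ≤ adj)) left l) := by
  induction l with
  | nil =>
    intro left ah adj _
    simp only [List.foldl_nil, pvNb]
    by_cases h2 : adj < 2
    · simp [h2, show ¬ ((2:Int) ≤ adj) from by omega]
    · simp [h2, show (2:Int) ≤ adj from by omega]
  | cons c t ih =>
    intro left ah adj h1
    have hc : c ≠ '_' := hl c (by simp)
    have hl' : ∀ x ∈ t, x ≠ '_' := fun x hx => hl x (by simp [hx])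
    simp only [List.foldl_cons, pvTStep, if_neg hc]
    by_cases hcl : c = left
    · subst hcl
      rw [if_pos rfl, ih hl' c ah (adj + 1) (by omega)]
      simp [pvNb, show (2:Int) ≤ adj + 1 by omega]
    · simp only [if_neg hcl]
      rw [ih hl' c (if adj < 2 then false else ah) 1 (by omega)]
      have hbeq : (c == left) = false := by simp [hcl]
      by_cases h2 : adj < 2
      · simp [pvNb, h2, hbeq, show ¬ (2 ≤ adj) by omega]
      · simp [pvNb, h2, hbeq, show (2 : Int) ≤ adj by omega]

theorem pvAllCongr {α : Type} (l : List α) (p q : α → Bool) (h : ∀ a ∈ l, p a = q a) :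
    l.all p = l.all q := by
  induction l with
  | nil => rfl
  | cons x t ih => simp only [List.all_cons, h x (by simp), ih fun a ha => h a (by simp [ha])]

def pvNG (l : List Char) (prev : Bool) (i : Nat) : Bool :=
  (if i = 0 then prev else l[i-1]? == l[i]?) || (l[i+1]? == l[i]?)

theorem pvNb_idx (t : List Char) : ∀ (a : Char) (prev : Bool),
    pvNb prev a t = (List.range (t.length + 1)).all (pvNG (a :: t) prev) := by
  induction t with
  | nil =>
    intro a prev
    simp [pvNb, pvNG, List.range_succ]
  | cons c t ih =>
    intro a prev
    have hbc : ∀ (x y : Char), (x == y) = (y == x) := by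
      intro x y
      by_cases h : x = y
      · simp [h]
      · simp [h, Ne.symm h]
    have hr : List.range (t.length + 1 + 1) = 0 :: (List.range (t.length + 1)).map Nat.succ :=
      List.range_succ_eq_map
    rw [show (c :: t).length + 1 = t.length + 1 + 1 from by simp, hr]
    simp only [List.all_cons, List.all_map]
    have h0 : pvNG (a :: c :: t) prev 0 = (prev || (c == a)) := by
      simp [pvNG]
    have hshift : ∀ i ∈ List.range (t.length + 1),
        (pvNG (a :: c :: t) prev ∘ Nat.succ) i = pvNG (c :: t) (c == a) i := by
      intro i _
      cases i with
      | zero => simp [pvNG, hbc]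
      | succ j => simp [pvNG, List.getElem?_cons_succ]
    rw [h0, pvAllCongr _ _ _ hshift, ← ih c (c == a)]
    rfl

-- invariant: while already_happy is still true, every counted value is ≥ 2 except possibly
-- the current letter's, which is at least adj_count
def pvInv (left : Char) (ah : Bool) (adj : Int) (d : PySem.Dict Char Int) : Prop :=
  ah = true →
    (1 ≤ adj ∧ (∀ kv ∈ d.items, 2 ≤ kv.2 ∨ kv.1 = left)
      ∧ (left ≠ '_' → ∃ v, d.get? left = some v ∧ adj ≤ v)
      ∧ (left = '_' → d.items = []))

theorem pvNodupStep (d : PySem.Dict Char Int) (c : Char) (h : d.keys.Nodup) :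
    (pvDStep d c).keys.Nodup := by
  rw [pvDStep_eq_pvBCount]
  unfold pvBCount
  split_ifs
  · exact PySem.Dict.nodup_keys_insert _ _ _ h
  · exact h

theorem pvNodupFold (l : List Char) (d : PySem.Dict Char Int) (h : d.keys.Nodup) :
    (l.foldl pvDStep d).keys.Nodup := by
  induction l generalizing d with
  | nil => exact h
  | cons c t ih => exact ih _ (pvNodupStep d c h)

theorem pvInvStep (c left : Char) (ah : Bool) (adj : Int) (d : PySem.Dict Char Int)
    (hnd : d.keys.Nodup) (hinv : pvInv left ah adj d) :
    pvInv (pvTStep (left, ah, adj) c).1 (pvTStep (left, ah, adj) c).2.1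
      (pvTStep (left, ah, adj) c).2.2 (pvDStep d c) := by
  by_cases hc : c = '_'
  · have ht : pvTStep (left, ah, adj) c = (left, (if adj < 2 then false else ah), adj) := by
      simp [pvTStep, hc]
    have hd : pvDStep d c = d := by simp [pvDStep, hc]
    rw [ht, hd]
    unfold pvInv
    dsimp only
    intro hah
    have hah' : ah = true := by
      by_cases h2 : adj < 2
      · rw [if_pos h2] at hah; exact absurd hah (by simp)
      · rwa [if_neg h2] at hah
    exact hinv hah'
  · have hd : pvDStep d c = d.insert c (d.getD c 0 + 1) := by
      rw [pvDStep_eq_pvBCount]; simp [pvBCount, hc]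
    by_cases hcl : c = left
    · subst hcl
      have ht : pvTStep (c, ah, adj) c = (c, ah, adj + 1) := by simp [pvTStep, hc]
      rw [ht, hd]
      unfold pvInv
      dsimp only
      intro hah
      obtain ⟨h1, h2, h3, h4⟩ := hinv hah
      obtain ⟨v, hv, hav⟩ := h3 hc
      have hgd : d.getD c 0 = v := PySem.Dict.getD_of_get?_eq_some _ _ hv
      refine ⟨by omega, ?_, ?_, fun h => absurd h hc⟩
      · intro kv hkv
        rcases (PySem.Dict.mem_items_insert _ _ _ _).1 hkv with h | ⟨hmem, _⟩
        · right; rw [h]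
        · exact h2 kv hmem
      · intro _
        exact ⟨d.getD c 0 + 1, PySem.Dict.get?_insert_self _ _ _, by omega⟩
    · have ht : pvTStep (left, ah, adj) c = (c, (if adj < 2 then false else ah), 1) := by
        simp [pvTStep, hc, hcl]
      rw [ht, hd]
      unfold pvInv
      dsimp only
      intro hah
      have hah' : ah = true ∧ 2 ≤ adj := by
        by_cases h2 : adj < 2
        · rw [if_pos h2] at hah; exact absurd hah (by simp)
        · rw [if_neg h2] at hah; exact ⟨hah, by omega⟩
      obtain ⟨h1, h2, h3, h4⟩ := hinv hah'.1
      refine ⟨le_refl 1, ?_, ?_, fun h => absurd h hc⟩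
      · intro kv hkv
        rcases (PySem.Dict.mem_items_insert _ _ _ _).1 hkv with h | ⟨hmem, hne⟩
        · right; rw [h]
        · left
          rcases h2 kv hmem with h2v | h2l
          · exact h2v
          · by_cases hl : left = '_'
            · rw [hl] at h4; simp [h4 rfl] at hmem
            · obtain ⟨v, hv, hav⟩ := h3 hl
              have hmem' : (kv.1, kv.2) ∈ d.items := by rw [Prod.mk.eta]; exact hmem
              have hq : d.get? kv.1 = some kv.2 := PySem.Dict.get?_of_mem_items _ hmem' hnd
              rw [h2l, hv] at hq
              have : v = kv.2 := by injection hq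
              omega
      · intro _
        refine ⟨d.getD c 0 + 1, PySem.Dict.get?_insert_self _ _ _, ?_⟩
        rcases hgc : d.get? c with _ | v
        · rw [PySem.Dict.getD_eq_get?_getD, hgc]; simp
        · have hm := PySem.Dict.mem_items_of_get?_eq_some _ hgc
          rcases h2 (c, v) hm with h2v | h2l
          · have hg : d.getD c 0 = v := PySem.Dict.getD_of_get?_eq_some _ _ hgc
            simp only at h2v
            omega
          · exact absurd h2l hcl

theorem pvInvFold (l : List Char) :
    ∀ (left : Char) (ah : Bool) (adj : Int) (d : PySem.Dict Char Int),
    d.keys.Nodup → pvInv left ah adj d →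
    pvInv (l.foldl pvTStep (left, ah, adj)).1 (l.foldl pvTStep (left, ah, adj)).2.1
      (l.foldl pvTStep (left, ah, adj)).2.2 (l.foldl pvDStep d) := by
  induction l with
  | nil => intro left ah adj d _ hinv; exact hinv
  | cons c t ih =>
    intro left ah adj d hnd hinv
    simp only [List.foldl_cons]
    have hstep := pvInvStep c left ah adj d hnd hinv
    have hnd' := pvNodupStep d c hnd
    have := ih (pvTStep (left, ah, adj) c).1 (pvTStep (left, ah, adj) c).2.1
      (pvTStep (left, ah, adj) c).2.2 (pvDStep d c) hnd' hstep
    simpa using this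

theorem pvAh_all2 (left : Char) (ah : Bool) (adj : Int) (d : PySem.Dict Char Int)
    (hnd : d.keys.Nodup) (hinv : pvInv left ah adj d)
    (hah : (if adj < 2 then false else ah) = true) :
    d.values.all (fun v => decide (2 ≤ v)) = true := by
  have hah' : ah = true ∧ 2 ≤ adj := by
    by_cases h2 : adj < 2
    · rw [if_pos h2] at hah; exact absurd hah (by simp)
    · rw [if_neg h2] at hah; exact ⟨hah, by omega⟩
  obtain ⟨h1, h2, h3, h4⟩ := hinv hah'.1
  rw [List.all_eq_true]
  intro v hv
  simp only [PySem.Dict.values, List.mem_map] at hv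
  obtain ⟨kv, hkv, hkv2⟩ := hv
  rcases h2 kv hkv with h2v | h2l
  · simp [← hkv2]; omega
  · by_cases hl : left = '_'
    · rw [hl] at h2l h4; rw [h4 rfl] at hkv; simp at hkv
    · obtain ⟨w, hw, haw⟩ := h3 hl
      have hmem' : (kv.1, kv.2) ∈ d.items := by rw [Prod.mk.eta]; exact hkv
      have hq : d.get? kv.1 = some kv.2 := PySem.Dict.get?_of_mem_items _ hmem' hnd
      rw [h2l, hw] at hq
      have : w = kv.2 := by injection hq
      simp [← hkv2]; omega

theorem pvIdx_eq (l : List Char) :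
    ∀ i ∈ List.range l.length,
      ((decide (0 < i) && (l[i-1]? == l[i]?)) || (decide (i + 1 < l.length) && (l[i+1]? == l[i]?)))
        = pvNG l false i := by
  intro i hi
  rw [List.mem_range] at hi
  unfold pvNG
  have hsome : l[i]? = some (l[i]'hi) := List.getElem?_eq_getElem hi
  by_cases h1 : i + 1 < l.length
  · have : decide (i + 1 < l.length) = true := by simp [h1]
    cases i with
    | zero => simp [this]
    | succ j => simp [this]
  · have hnone : l[i+1]? = none := List.getElem?_eq_none (by omega)
    cases i with
    | zero => simp [hnone, hsome]
    | succ j => simp [hnone, hsome]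


-- ===== VERDICT (by name: the statement is the Claim_ definition above) =====
theorem happy_ladybug_spec : Claim_equal_happy_ladybug := by
  unfold Claim_equal_happy_ladybug
  intro b _
  unfold Spec_happy_ladybug happy_ladybug happy_ladybug_alt
  rcases hb : b.toList with _ | ⟨c0, rest⟩
  · simp
  · simp only
    rw [pvSplit rest c0 true 1 _ (c0 == '_')]
    have hd0 : (if c0 ≠ '_' then
        let d1 := (PySem.Dict.empty : PySem.Dict Char Int).setdefault c0 0
        d1.insert c0 (d1.getD c0 0 + 1)
      else PySem.Dict.empty) = pvDStep PySem.Dict.empty c0 := by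
      unfold pvDStep
      by_cases hc0 : c0 = '_' <;> simp [hc0]
    rw [hd0, pvHFold]
    have hcounts : (c0 :: rest).foldl pvBCount PySem.Dict.empty
        = rest.foldl pvDStep (pvDStep PySem.Dict.empty c0) := by
      rw [pvDStep_eq_pvBCount, List.foldl_cons]
    rw [hcounts]
    set D := rest.foldl pvDStep (pvDStep PySem.Dict.empty c0) with hD
    set T := rest.foldl pvTStep (c0, true, 1) with hT
    have hnd : D.keys.Nodup :=
      pvNodupFold _ _ (pvNodupStep _ c0 PySem.Dict.nodup_keys_empty)
    have hall : (D.values.map (fun x => decide (2 ≤ x))).all (fun y => y)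
        = D.values.all (fun v => decide (2 ≤ v)) := by
      rw [List.all_map]; rfl
    by_cases hus : '_' ∈ (c0 :: rest)
    · -- underscore present: has_empty is true and already_happy forces all counts ≥ 2
      have hhe : ((c0 == '_') || rest.contains '_') = true := by
        rcases List.mem_cons.1 hus with h | h
        · simp [h.symm]
        · simp [h]
      rw [hhe]
      have hinv0 : pvInv c0 true 1 (pvDStep PySem.Dict.empty c0) := by
        intro _
        by_cases hc0 : c0 = '_'
        · refine ⟨le_refl 1, ?_, fun h => absurd hc0 h, fun _ => ?_⟩ <;>
            simp [pvDStep, hc0, PySem.Dict.empty]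
        · have hstep : pvDStep PySem.Dict.empty c0
              = (PySem.Dict.empty : PySem.Dict Char Int).insert c0 (0 + 1) := by
            rw [pvDStep_eq_pvBCount]
            simp [pvBCount, hc0, PySem.Dict.getD_empty]
          rw [hstep]
          refine ⟨le_refl 1, ?_, fun _ => ⟨0 + 1, PySem.Dict.get?_insert_self _ _ _, by omega⟩,
            fun h => absurd h hc0⟩
          intro kv hkv
          rcases (PySem.Dict.mem_items_insert _ _ _ _).1 hkv with h | ⟨hmem, _⟩
          · right; rw [h]
          · simp [PySem.Dict.empty] at hmem
      have hinv := pvInvFold rest c0 true 1 (pvDStep PySem.Dict.empty c0)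
        (pvNodupStep _ c0 PySem.Dict.nodup_keys_empty) hinv0
      rw [← hT, ← hD] at hinv
      cases hA : (if T.2.2 < 2 then false else T.2.1) with
      | false => simp [hall, hus]
      | true =>
        have h2 := pvAh_all2 T.1 T.2.1 T.2.2 D hnd hinv hA
        simp [hall, h2, hus]
    · -- no underscore: has_empty is false and both sides reduce to the neighbour check
      have hc0 : c0 ≠ '_' := fun h => hus (by simp [h])
      have hrest : ∀ x ∈ rest, x ≠ '_' := fun x hx h => hus (List.mem_cons_of_mem _ (h ▸ hx))
      have hhe : ((c0 == '_') || rest.contains '_') = false := by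
        simp only [Bool.or_eq_false_iff, beq_eq_false_iff_ne, ne_eq]
        exact ⟨hc0, by simpa using fun h => hus (List.mem_cons_of_mem _ h)⟩
      rw [hhe]
      have hA := pvTFold_no_us rest hrest c0 true 1 (by omega)
      rw [← hT] at hA
      have hcf : ((c0 :: rest).contains '_') = false := by
        simp only [List.contains_eq_mem, decide_eq_false_iff_not]
        exact hus
      have hB : (List.range (c0 :: rest).length).all (fun i =>
          ((decide (0 < i) && ((c0 :: rest)[i-1]? == (c0 :: rest)[i]?))
            || (decide (i + 1 < (c0 :: rest).length) && ((c0 :: rest)[i+1]? == (c0 :: rest)[i]?))))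
          = pvNb false c0 rest := by
        rw [pvAllCongr _ _ _ (pvIdx_eq (c0 :: rest)), pvNb_idx rest c0 false]
        rfl
      rw [hA, if_neg (by rw [hcf]; exact Bool.false_ne_true), hB]
      simp
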